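-- pv_equiv track=rewrite | github.com/0dminnimda/diff_editor | test_diff.py | generate_side_by_side_lines
-- ===== SOURCE A (Python) =====
-- RED_BG = "\033[41m"
--
-- GREEN_BG = "\033[42m"
--
-- RESET = "\033[0m"
--
-- def generate_side_by_side_lines(opcodes):
--     """
--     A generator that takes character-level opcodes from fast_diff_match_patch
--      and yields pairs of completed, colored, side-by-side lines.
--     """
--     left_line_parts = []
--     right_line_parts = []
--
--     for kind, text in opcodes:
--         # Split the text by newlines. The parts list will contain the content
--         # between newlines. The number of newlines is len(parts) - 1.
--         parts = text.split('\n')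
--
--         for i, part in enumerate(parts):
--             # If the part is not empty, add it to the correct column(s)
--             if part:
--                 if kind == '=':
--                     left_line_parts.append(part)
--                     right_line_parts.append(part)
--                 elif kind == '-':
--                     left_line_parts.append(f"{RED_BG}{part}{RESET}")
--                 elif kind == '+':
--                     right_line_parts.append(f"{GREEN_BG}{part}{RESET}")
--
--             # If this is not the last part, it means a newline was here.
--             # This completes a line, so we yield the result and reset.
--             if i < len(parts) - 1:
--                 yield ("".join(left_line_parts), "".join(right_line_parts))
--                 left_line_parts = []
--                 right_line_parts = []
--
--     # After the loop, there might be a final, non-terminated line. Yield it.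
--     if left_line_parts or right_line_parts:
--         yield ("".join(left_line_parts), "".join(right_line_parts))
-- ===== SOURCE B (Python) =====
-- RED_BG = "\033[41m"
--
-- GREEN_BG = "\033[42m"
--
-- RESET = "\033[0m"
--
--
-- def _wrap(part, color):
--     return color + part + RESET if part else ''
--
--
-- def generate_side_by_side_lines(opcodes):
--     """Render each opcode into one full string per column, then split both
--     columns on newlines and zip them into side-by-side line pairs."""
--     left_cols = []
--     right_cols = []
--     for kind, text in opcodes:
--         parts = text.split('\n')
--         if kind == '=':
--             left = right = text
--         elif kind == '-':
--             left = '\n'.join(_wrap(p, RED_BG) for p in parts)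
--             right = '\n' * (len(parts) - 1)
--         elif kind == '+':
--             left = '\n' * (len(parts) - 1)
--             right = '\n'.join(_wrap(p, GREEN_BG) for p in parts)
--         else:
--             left = right = '\n' * (len(parts) - 1)
--         left_cols.append(left)
--         right_cols.append(right)
--     pairs = list(zip(''.join(left_cols).split('\n'), ''.join(right_cols).split('\n')))
--     if pairs[-1] == ('', ''):
--         pairs.pop()
--     yield from pairs
-- ===== Notes on version B (the rewrite author's own statement) =====
-- stated objective: alternative
-- what changed: Replaces A's streaming accumulator (part lists flushed at every newline, the inner enumerate/index bookkeeping deciding when to yield) by a build-then-split decomposition: each opcode is rendered into one complete colored string per column, the two column strings are concatenated, split on newlines (the newline positions coincide by construction) and zipped, dropping the trailing pair only when both halves are empty.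
import Mathlib
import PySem

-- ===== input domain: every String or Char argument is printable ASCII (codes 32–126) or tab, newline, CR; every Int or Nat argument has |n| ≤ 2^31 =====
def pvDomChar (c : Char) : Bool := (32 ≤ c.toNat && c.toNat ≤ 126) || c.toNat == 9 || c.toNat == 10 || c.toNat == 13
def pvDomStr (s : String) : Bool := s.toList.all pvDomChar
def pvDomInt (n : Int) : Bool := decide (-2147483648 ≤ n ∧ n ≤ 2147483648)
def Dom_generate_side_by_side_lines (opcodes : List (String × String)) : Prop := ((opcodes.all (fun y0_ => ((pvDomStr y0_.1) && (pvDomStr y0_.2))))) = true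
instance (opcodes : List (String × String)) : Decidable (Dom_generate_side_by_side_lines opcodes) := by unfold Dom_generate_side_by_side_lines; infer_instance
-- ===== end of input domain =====

-- B replaces A's streaming accumulator (flush at each newline) by render-whole-columns,
-- then split both column strings on newlines and zip; objective: alternative decomposition.
-- Both Pythons are generators; equivalence is about the yielded sequence, fully consumed.

-- s.split('\n') — exact: Str.split? with the nonempty literal separator "\n" is `some` of exactly this
def pvSplitNL (s : String) : List String :=
  (PySem.Chars.splitOn s.toList ['\n']).map String.ofList

-- ===== PORT A ===== (the two for-loops as structural recursion over the same state)
mutual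
def portA_go : List (String × String) → List String → List String → List (String × String) → List (String × String)
  | [], lp, rp, out =>
      -- if left_line_parts or right_line_parts: yield
      if lp ≠ [] ∨ rp ≠ [] then out ++ [(PySem.Str.join "" lp, PySem.Str.join "" rp)] else out
  | (kind, text) :: ops, lp, rp, out =>
      let parts := pvSplitNL text
      portA_inner kind (PySem.List.len parts) ops (PySem.List.enumerate parts 0) lp rp out
  termination_by ops _ _ _ => (ops.length, 0)

def portA_inner : String → Int → List (String × String) → List (Int × String) → List String → List String → List (String × String) → List (String × String)
  | _, _, ops, [], lp, rp, out => portA_go ops lp rp out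
  | kind, n, ops, (i, part) :: rest, lp, rp, out =>
      let st :=
        if part ≠ "" then
          if kind = "=" then (lp ++ [part], rp ++ [part])
          else if kind = "-" then (lp ++ [PySem.Str.join "" ["\x1b[41m", part, "\x1b[0m"]], rp)
          else if kind = "+" then (lp, rp ++ [PySem.Str.join "" ["\x1b[42m", part, "\x1b[0m"]])
          else (lp, rp)
        else (lp, rp)
      if i < n - 1 then
        portA_inner kind n ops rest [] [] (out ++ [(PySem.Str.join "" st.1, PySem.Str.join "" st.2)])
      else
        portA_inner kind n ops rest st.1 st.2 out
  termination_by _ _ ops l _ _ _ => (ops.length, l.length + 1)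
end

def generate_side_by_side_lines (opcodes : List (String × String)) : List (String × String) :=
  portA_go opcodes [] [] []

-- ===== PORT B =====
def pvWrap (color part : String) : String :=
  if part ≠ "" then PySem.Str.join "" [color, part, "\x1b[0m"] else ""

-- '\n' * n — exact (n = len(parts) - 1 below, len(parts) ≥ 1 always)
def pvNLRepeat (n : Nat) : String := String.ofList (List.replicate n '\n')

def portB_cols (opcodes : List (String × String)) (acc : List String × List String) : List String × List String :=
  opcodes.foldl (fun acc op =>
    let parts := pvSplitNL op.2
    let lr :=
      if op.1 = "=" then (op.2, op.2)
      else if op.1 = "-" then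
        (PySem.Str.join "\n" (parts.map (pvWrap "\x1b[41m")), pvNLRepeat (parts.length - 1))
      else if op.1 = "+" then
        (pvNLRepeat (parts.length - 1), PySem.Str.join "\n" (parts.map (pvWrap "\x1b[42m")))
      else (pvNLRepeat (parts.length - 1), pvNLRepeat (parts.length - 1))
    (acc.1 ++ [lr.1], acc.2 ++ [lr.2])) acc

def generate_side_by_side_lines_alt (opcodes : List (String × String)) : List (String × String) :=
  let cols := portB_cols opcodes ([], [])
  let pairs := (pvSplitNL (PySem.Str.join "" cols.1)).zip (pvSplitNL (PySem.Str.join "" cols.2))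
  -- pairs[-1] is total: split('\n') always returns at least one piece, so pairs ≠ []
  if pairs.getLast? = some ("", "") then pairs.dropLast else pairs

-- ===== PRECONDITION & SPEC =====
def Spec_generate_side_by_side_lines (opcodes : List (String × String)) (out : List (String × String)) : Prop := out = generate_side_by_side_lines_alt opcodes
instance (opcodes : List (String × String)) (out : List (String × String)) : Decidable (Spec_generate_side_by_side_lines opcodes out) := by unfold Spec_generate_side_by_side_lines; infer_instance

-- ===== CLAIM (what is proved, stated in full; the proofs are below) =====
def Claim_equal_generate_side_by_side_lines : Prop := ∀ (opcodes : List (String × String)), Dom_generate_side_by_side_lines opcodes → Spec_generate_side_by_side_lines opcodes (generate_side_by_side_lines opcodes)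

-- ===== LEMMAS AND PROOFS =====

-- Char-level model: both ports are reduced to `emit (zip lines-left lines-right)`.

def splitNL : List Char → List (List Char)
  | [] => [[]]
  | c :: r => if c = '\n' then [] :: splitNL r else (splitNL r).modifyHead (c :: ·)

def glue : List (List Char) → List (List Char) → List (List Char)
  | [], ys => ys
  | [x], ys => ys.modifyHead (x ++ ·)
  | x :: y :: xs, ys => x :: glue (y :: xs) ys

def joinNL : List (List Char) → List Char
  | [] => []
  | [p] => p
  | p :: q :: ps => p ++ '\n' :: joinNL (q :: ps)

def redC : List Char := ['\x1b', '[', '4', '1', 'm']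
def greenC : List Char := ['\x1b', '[', '4', '2', 'm']
def resetC : List Char := ['\x1b', '[', '0', 'm']

def lpart (k : List Char) (p : List Char) : List Char :=
  if k = ['='] then p else if k = ['-'] then (if p = [] then [] else redC ++ p ++ resetC) else []

def rpart (k : List Char) (p : List Char) : List Char :=
  if k = ['='] then p else if k = ['+'] then (if p = [] then [] else greenC ++ p ++ resetC) else []

def linesBy (f : List Char → List Char → List Char) : List (List Char × List Char) → List (List Char)
  | [] => [[]]
  | (k, t) :: ops => glue ((splitNL t).map (f k)) (linesBy f ops)

def emitC (l : List (List Char × List Char)) : List (List Char × List Char) :=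
  if l.getLast? = some ([], []) then l.dropLast else l

mutual
def goA : List (List Char × List Char) → List Char → List Char → List (List Char × List Char)
  | [], lp, rp => if lp = [] ∧ rp = [] then [] else [(lp, rp)]
  | (k, t) :: ops, lp, rp => innerA k ops (splitNL t) lp rp
  termination_by ops _ _ => (ops.length, 0)

def innerA : List Char → List (List Char × List Char) → List (List Char) → List Char → List Char → List (List Char × List Char)
  | _, ops, [], lp, rp => goA ops lp rp
  | k, ops, [p], lp, rp => goA ops (lp ++ lpart k p) (rp ++ rpart k p)
  | k, ops, p :: q :: ps, lp, rp => (lp ++ lpart k p, rp ++ rpart k p) :: innerA k ops (q :: ps) [] []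
  termination_by _ ops l _ _ => (ops.length, l.length + 1)
end

def charify (ops : List (String × String)) : List (List Char × List Char) :=
  ops.map (fun p => (p.1.toList, p.2.toList))

def strf (l : List (List Char × List Char)) : List (String × String) :=
  l.map (fun p => (String.ofList p.1, String.ofList p.2))

def jc (lp : List String) : List Char := (lp.map String.toList).flatten

-- ---- basic list/string facts ----

@[simp] theorem modifyHead_id {α : Type} (l : List α) : l.modifyHead (fun x => x) = l := by
  cases l <;> simp

@[simp] theorem modifyHead_nil_append (l : List (List Char)) :
    l.modifyHead (fun x => [] ++ x) = l := by
  cases l <;> simp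

theorem modifyHead_comp {α : Type} (f g : α → α) (l : List α) :
    (l.modifyHead f).modifyHead g = l.modifyHead (fun x => g (f x)) := by
  cases l <;> simp

theorem modifyHead_congr {α : Type} (f g : α → α) (l : List α) (h : ∀ x, f x = g x) :
    l.modifyHead f = l.modifyHead g := by
  cases l <;> simp [h]

theorem zip_ne_nil {α β : Type} (xs : List α) (ys : List β) (hx : xs ≠ []) (hy : ys ≠ []) :
    xs.zip ys ≠ [] := by
  cases xs <;> cases ys <;> simp_all

theorem str_eq_iff_toList (s : String) (cs : List Char) : s = String.ofList cs ↔ s.toList = cs := by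
  constructor
  · intro h; rw [h]; simp
  · intro h; rw [← h]; simp

theorem toList_eq_nil_iff (s : String) : s.toList = [] ↔ s = "" := by
  constructor
  · intro hh
    have : s = String.ofList [] := by rw [str_eq_iff_toList]; exact hh
    simpa using this
  · intro hh; simp [hh]

theorem intercalate_nil_eq_flatten (ls : List (List Char)) :
    List.intercalate [] ls = ls.flatten := by
  induction ls with
  | nil => simp [List.intercalate]
  | cons a t ih =>
    cases t with
    | nil => simp [List.intercalate, List.intersperse]
    | cons b t2 =>
      simp only [List.intercalate, List.intersperse, List.flatten_cons] at ih ⊢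
      simp [ih]

theorem joinNL_eq_intercalate (ls : List (List Char)) :
    joinNL ls = List.intercalate ['\n'] ls := by
  induction ls with
  | nil => simp [joinNL, List.intercalate]
  | cons a t ih =>
    cases t with
    | nil => simp [joinNL, List.intercalate, List.intersperse]
    | cons b t2 =>
      simp only [joinNL, ih]
      simp only [List.intercalate, List.intersperse, List.flatten_cons]
      simp

theorem join_empty_eq (lp : List String) :
    PySem.Str.join "" lp = String.ofList (jc lp) := by
  rw [str_eq_iff_toList, PySem.Str.toList_join]
  simp [PySem.Chars.join, intercalate_nil_eq_flatten, jc]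

theorem jc_append_single (lp : List String) (s : String) :
    jc (lp ++ [s]) = jc lp ++ s.toList := by
  simp [jc]

theorem jc_eq_nil_of_no_empty (lp : List String) (h : ∀ x ∈ lp, x ≠ "") :
    jc lp = [] ↔ lp = [] := by
  induction lp with
  | nil => simp [jc]
  | cons a t ih =>
    simp only [jc, List.map_cons, List.flatten_cons, List.append_eq_nil_iff]
    constructor
    · rintro ⟨h1, _⟩
      exact absurd ((toList_eq_nil_iff a).mp h1) (h a (by simp))
    · intro hh; simp at hh

-- ---- splitNL facts ----

@[simp] theorem splitNL_nil : splitNL [] = [[]] := rfl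

theorem splitNL_cons_nl (r : List Char) : splitNL ('\n' :: r) = [] :: splitNL r := by
  simp [splitNL]

theorem splitNL_cons (c : Char) (r : List Char) (hc : c ≠ '\n') :
    splitNL (c :: r) = (splitNL r).modifyHead (c :: ·) := by
  simp [splitNL, hc]

theorem splitNL_ne_nil (l : List Char) : splitNL l ≠ [] := by
  induction l with
  | nil => simp
  | cons c r ih =>
    by_cases hc : c = '\n'
    · subst hc; simp [splitNL_cons_nl]
    · rw [splitNL_cons c r hc]
      cases h : splitNL r with
      | nil => exact absurd h ih
      | cons a t => simp

theorem splitOn_go_eq (fuel : Nat) (l cur : List Char) (acc : List (List Char))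
    (h : l.length ≤ fuel) :
    PySem.Chars.splitOn.go ['\n'] fuel l cur acc
      = acc.reverse ++ (splitNL l).modifyHead (cur.reverse ++ ·) := by
  induction fuel generalizing l cur acc with
  | zero =>
    have hl : l = [] := by cases l <;> simp_all
    subst hl
    rw [PySem.Chars.splitOn.go.eq_def]
    simp
  | succ fuel ih =>
    cases l with
    | nil =>
      rw [PySem.Chars.splitOn.go.eq_def]
      simp
    | cons c rest =>
      rw [PySem.Chars.splitOn.go.eq_def]
      by_cases hc : c = '\n'
      · subst hc
        have hp : ['\n'].isPrefixOf ('\n' :: rest) = true := by simp [List.isPrefixOf]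
        simp only [hp, if_true]
        rw [show List.drop (['\n'].length) ('\n' :: rest) = rest from rfl]
        rw [ih rest [] (cur.reverse :: acc) (by simp at h; omega)]
        simp [splitNL_cons_nl]
      · have hp : ['\n'].isPrefixOf (c :: rest) = false := by
          simp [List.isPrefixOf]
          exact fun hh => absurd hh.symm hc
        simp only [hp, Bool.false_eq_true, if_false]
        rw [ih rest (c :: cur) acc (by simp at h; omega)]
        rw [splitNL_cons c rest hc, modifyHead_comp]
        congr 1
        apply modifyHead_congr
        intro x
        simp

theorem splitOn_eq_splitNL (l : List Char) :
    PySem.Chars.splitOn l ['\n'] = splitNL l := by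
  rw [PySem.Chars.splitOn, splitOn_go_eq _ _ _ _ (by omega)]
  simp

theorem pvSplitNL_eq (s : String) :
    pvSplitNL s = (splitNL s.toList).map String.ofList := by
  simp [pvSplitNL, splitOn_eq_splitNL]

theorem glue_ne_nil (xs ys : List (List Char)) (h : ys ≠ []) : glue xs ys ≠ [] := by
  match xs with
  | [] => simpa [glue]
  | [x] => cases ys with | nil => simp_all | cons a t => simp [glue]
  | x :: y :: t => simp [glue]

theorem glue_modifyHead (xs ys : List (List Char)) (c : Char) (h : xs ≠ []) :
    (glue xs ys).modifyHead (c :: ·) = glue (xs.modifyHead (c :: ·)) ys := by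
  match xs with
  | [x] =>
    simp only [glue, List.modifyHead_cons]
    rw [modifyHead_comp]
    apply modifyHead_congr
    intro z
    simp
  | x :: y :: t => simp [glue]

theorem splitNL_append (a b : List Char) :
    splitNL (a ++ b) = glue (splitNL a) (splitNL b) := by
  induction a with
  | nil => simp [glue]
  | cons c r ih =>
    by_cases hc : c = '\n'
    · subst hc
      rw [List.cons_append, splitNL_cons_nl, splitNL_cons_nl, ih]
      cases h : splitNL r with
      | nil => exact absurd h (splitNL_ne_nil r)
      | cons x t => simp [glue]
    · rw [List.cons_append, splitNL_cons c _ hc, splitNL_cons c r hc, ih]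
      rw [glue_modifyHead _ _ _ (splitNL_ne_nil r)]

theorem noNL_mem_splitNL (l p : List Char) (hp : p ∈ splitNL l) : '\n' ∉ p := by
  induction l generalizing p with
  | nil =>
    simp at hp
    simp [hp]
  | cons c r ih =>
    by_cases hc : c = '\n'
    · subst hc
      rw [splitNL_cons_nl] at hp
      rcases List.mem_cons.mp hp with h1 | h1
      · simp [h1]
      · exact ih p h1
    · rw [splitNL_cons c r hc] at hp
      cases h : splitNL r with
      | nil => exact absurd h (splitNL_ne_nil r)
      | cons x t =>
        rw [h, List.modifyHead_cons] at hp
        rcases List.mem_cons.mp hp with h1 | h1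
        · subst h1
          intro hmem
          rcases List.mem_cons.mp hmem with h2 | h2
          · exact hc h2.symm
          · exact ih x (by simp [h]) h2
        · exact ih p (by simp [h, h1])

theorem splitNL_of_noNL (l : List Char) (h : '\n' ∉ l) : splitNL l = [l] := by
  induction l with
  | nil => simp
  | cons c r ih =>
    have hc : c ≠ '\n' := fun hh => h (by simp [hh])
    rw [splitNL_cons c r hc, ih (fun hh => h (by simp [hh]))]
    simp

theorem splitNL_joinNL (ps : List (List Char)) (h : ∀ p ∈ ps, '\n' ∉ p) (hne : ps ≠ []) :
    splitNL (joinNL ps) = ps := by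
  match ps with
  | [p] =>
    simp only [joinNL]
    exact splitNL_of_noNL p (h p (by simp))
  | p :: q :: t =>
    simp only [joinNL]
    rw [splitNL_append, splitNL_of_noNL p (h p (by simp))]
    rw [splitNL_cons_nl]
    rw [splitNL_joinNL (q :: t) (fun x hx => h x (by simp [List.mem_cons] at hx ⊢; tauto)) (by simp)]
    simp [glue]

theorem linesBy_ne_nil (f : List Char → List Char → List Char) (ops : List (List Char × List Char)) :
    linesBy f ops ≠ [] := by
  cases ops with
  | nil => simp [linesBy]
  | cons op t => exact glue_ne_nil _ _ (linesBy_ne_nil f t)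

-- ---- A char-level invariant ----

theorem emitC_cons (x : List Char × List Char) (l : List (List Char × List Char)) (h : l ≠ []) :
    emitC (x :: l) = x :: emitC l := by
  cases l with
  | nil => exact absurd rfl h
  | cons y t =>
    simp only [emitC, List.getLast?_cons_cons]
    split <;> simp

theorem innerA_eq (k : List Char) (ops : List (List Char × List Char))
    (H : ∀ lp rp, goA ops lp rp
      = emitC ((((linesBy lpart ops).modifyHead (lp ++ ·)).zip ((linesBy rpart ops).modifyHead (rp ++ ·))))) :
    ∀ ps lp rp, ps ≠ [] →
      innerA k ops ps lp rp
        = emitC (((glue (ps.map (lpart k)) (linesBy lpart ops)).modifyHead (lp ++ ·)).zip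
                 ((glue (ps.map (rpart k)) (linesBy rpart ops)).modifyHead (rp ++ ·))) := by
  intro ps
  induction ps with
  | nil => intro lp rp h; exact absurd rfl h
  | cons p t iht =>
    intro lp rp _
    cases t with
    | nil =>
      simp only [innerA]
      rw [H]
      simp only [List.map_cons, List.map_nil]
      rw [show glue [lpart k p] (linesBy lpart ops)
            = (linesBy lpart ops).modifyHead (lpart k p ++ ·) from rfl]
      rw [show glue [rpart k p] (linesBy rpart ops)
            = (linesBy rpart ops).modifyHead (rpart k p ++ ·) from rfl]
      rw [modifyHead_comp, modifyHead_comp]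
      congr 2 <;> (apply modifyHead_congr; intro x; simp)
    | cons q t2 =>
      simp only [innerA]
      rw [iht [] [] (by simp)]
      have hgl : glue ((p :: q :: t2).map (lpart k)) (linesBy lpart ops)
          = lpart k p :: glue ((q :: t2).map (lpart k)) (linesBy lpart ops) := by simp [glue]
      have hgr : glue ((p :: q :: t2).map (rpart k)) (linesBy rpart ops)
          = rpart k p :: glue ((q :: t2).map (rpart k)) (linesBy rpart ops) := by simp [glue]
      rw [hgl, hgr, List.modifyHead_cons, List.modifyHead_cons, List.zip_cons_cons]
      rw [emitC_cons _ _ (zip_ne_nil _ _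
        (glue_ne_nil _ _ (linesBy_ne_nil lpart ops)) (glue_ne_nil _ _ (linesBy_ne_nil rpart ops)))]
      simp

theorem goA_eq (ops : List (List Char × List Char)) : ∀ lp rp,
    goA ops lp rp
      = emitC ((((linesBy lpart ops).modifyHead (lp ++ ·)).zip ((linesBy rpart ops).modifyHead (rp ++ ·)))) := by
  induction ops with
  | nil =>
    intro lp rp
    simp only [goA]
    rw [show linesBy lpart [] = [[]] from rfl, show linesBy rpart [] = [[]] from rfl]
    simp only [List.modifyHead_cons, List.append_nil, List.zip_cons_cons, List.zip_nil_right]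
    by_cases h : lp = [] ∧ rp = []
    · obtain ⟨h1, h2⟩ := h
      subst h1; subst h2
      simp [emitC]
    · rw [if_neg h]
      have : ¬ ((lp, rp) = (([] : List Char), ([] : List Char))) := by
        simp only [Prod.mk.injEq]; exact h
      simp [emitC, this]
  | cons op t ih =>
    obtain ⟨k, tx⟩ := op
    intro lp rp
    simp only [goA]
    rw [innerA_eq k t ih (splitNL tx) lp rp (splitNL_ne_nil tx)]
    rfl

-- ---- port A reduction ----

theorem toList_ne (a b : String) (h : a ≠ b) : a.toList ≠ b.toList :=
  fun hh => h (String.toList_inj.mp hh)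

theorem lpart_nil (k : List Char) : lpart k [] = [] := by
  unfold lpart; split_ifs <;> simp_all

theorem rpart_nil (k : List Char) : rpart k [] = [] := by
  unfold rpart; split_ifs <;> simp_all

theorem wrap_toList (c p r : String) :
    (PySem.Str.join "" [c, p, r]).toList = c.toList ++ p.toList ++ r.toList := by
  rw [PySem.Str.toList_join]
  simp [PySem.Chars.join, intercalate_nil_eq_flatten]

theorem upd_eq (kind part : String) (lp rp : List String)
    (hl : ∀ x ∈ lp, x ≠ "") (hr : ∀ x ∈ rp, x ≠ "") :
    let st :=
      if part ≠ "" then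
        if kind = "=" then (lp ++ [part], rp ++ [part])
        else if kind = "-" then (lp ++ [PySem.Str.join "" ["\x1b[41m", part, "\x1b[0m"]], rp)
        else if kind = "+" then (lp, rp ++ [PySem.Str.join "" ["\x1b[42m", part, "\x1b[0m"]])
        else (lp, rp)
      else (lp, rp)
    jc st.1 = jc lp ++ lpart kind.toList part.toList ∧
    jc st.2 = jc rp ++ rpart kind.toList part.toList ∧
    PySem.Str.join "" st.1 = String.ofList (jc lp ++ lpart kind.toList part.toList) ∧
    PySem.Str.join "" st.2 = String.ofList (jc rp ++ rpart kind.toList part.toList) ∧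
    (∀ x ∈ st.1, x ≠ "") ∧ (∀ x ∈ st.2, x ≠ "") := by
  intro st
  suffices h : jc st.1 = jc lp ++ lpart kind.toList part.toList ∧
      jc st.2 = jc rp ++ rpart kind.toList part.toList ∧
      (∀ x ∈ st.1, x ≠ "") ∧ (∀ x ∈ st.2, x ≠ "") by
    obtain ⟨e1, e2, e3, e4⟩ := h
    exact ⟨e1, e2, by rw [join_empty_eq st.1, e1], by rw [join_empty_eq st.2, e2], e3, e4⟩
  have hEq : ("=" : String).toList = ['='] := by decide
  have hMinus : ("-" : String).toList = ['-'] := by decide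
  have hPlus : ("+" : String).toList = ['+'] := by decide
  by_cases hp : part = ""
  · have : st = (lp, rp) := by simp [st, hp]
    rw [this]
    subst hp
    refine ⟨?_, ?_, hl, hr⟩ <;>
      simp [lpart_nil, rpart_nil, String.toList_empty]
  · have hptl : part.toList ≠ [] := fun hh => hp ((toList_eq_nil_iff part).mp hh)
    by_cases hk1 : kind = "="
    · have : st = (lp ++ [part], rp ++ [part]) := by simp [st, hp, hk1]
      rw [this]
      subst hk1
      refine ⟨?_, ?_, ?_, ?_⟩
      · simp [jc_append_single, lpart, hEq]
      · simp [jc_append_single, rpart, hEq]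
      · intro x hx; rcases List.mem_append.mp hx with h | h
        · exact hl x h
        · simp at h; subst h; exact hp
      · intro x hx; rcases List.mem_append.mp hx with h | h
        · exact hr x h
        · simp at h; subst h; exact hp
    · have hk1' : kind.toList ≠ ['='] := by rw [← hEq]; exact toList_ne _ _ hk1
      by_cases hk2 : kind = "-"
      · have : st = (lp ++ [PySem.Str.join "" ["\x1b[41m", part, "\x1b[0m"]], rp) := by
          simp [st, hp, hk2]
        rw [this]
        have hw : (PySem.Str.join "" ["\x1b[41m", part, "\x1b[0m"]).toList
            = redC ++ part.toList ++ resetC := by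
          rw [wrap_toList]
          have h1 : ("\x1b[41m" : String).toList = redC := by decide
          have h2 : ("\x1b[0m" : String).toList = resetC := by decide
          rw [h1, h2]
        have hk2t : kind.toList = ['-'] := by rw [← hMinus, String.toList_inj]; exact hk2
        refine ⟨?_, ?_, ?_, hr⟩
        · rw [jc_append_single, hw]
          simp [lpart, hk2t, hptl]
        · simp [rpart, hk2t]
        · intro x hx; rcases List.mem_append.mp hx with h | h
          · exact hl x h
          · simp only [List.mem_singleton] at h; subst h
            intro hempty
            have := congrArg String.toList hempty
            rw [hw] at this
            simp [redC] at this
      · have hk2' : kind.toList ≠ ['-'] := by rw [← hMinus]; exact toList_ne _ _ hk2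
        by_cases hk3 : kind = "+"
        · have : st = (lp, rp ++ [PySem.Str.join "" ["\x1b[42m", part, "\x1b[0m"]]) := by
            simp [st, hp, hk3]
          rw [this]
          have hw : (PySem.Str.join "" ["\x1b[42m", part, "\x1b[0m"]).toList
              = greenC ++ part.toList ++ resetC := by
            rw [wrap_toList]
            have h1 : ("\x1b[42m" : String).toList = greenC := by decide
            have h2 : ("\x1b[0m" : String).toList = resetC := by decide
            rw [h1, h2]
          have hk3t : kind.toList = ['+'] := by rw [← hPlus, String.toList_inj]; exact hk3
          refine ⟨?_, ?_, hl, ?_⟩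
          · simp [lpart, hk1', hk2']
          · rw [jc_append_single, hw]
            simp [rpart, hk3t, hptl]
          · intro x hx; rcases List.mem_append.mp hx with h | h
            · exact hr x h
            · simp only [List.mem_singleton] at h; subst h
              intro hempty
              have := congrArg String.toList hempty
              rw [hw] at this
              simp [greenC] at this
        · have hk3' : kind.toList ≠ ['+'] := by rw [← hPlus]; exact toList_ne _ _ hk3
          have : st = (lp, rp) := by simp [st, hp, hk1, hk2, hk3]
          rw [this]
          refine ⟨?_, ?_, hl, hr⟩
          · simp [lpart, hk1', hk2']
          · simp [rpart, hk1', hk3']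

theorem red_inner (kind : String) (n : Int) (ops : List (String × String))
    (H : ∀ lp rp out, (∀ x ∈ lp, x ≠ "") → (∀ x ∈ rp, x ≠ "") →
      portA_go ops lp rp out = out ++ strf (goA (charify ops) (jc lp) (jc rp))) :
    ∀ (parts : List String) (s : Int) (lp rp : List String) (out : List (String × String)),
      s + parts.length = n → parts ≠ [] →
      (∀ x ∈ lp, x ≠ "") → (∀ x ∈ rp, x ≠ "") →
      portA_inner kind n ops (PySem.List.enumerate parts s) lp rp out
        = out ++ strf (innerA kind.toList (charify ops) (parts.map String.toList) (jc lp) (jc rp)) := by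
  intro parts
  induction parts with
  | nil => intro s lp rp out _ hne; exact absurd rfl hne
  | cons p t iht =>
    intro s lp rp out hn _ hl hr
    rw [PySem.List.enumerate_cons]
    simp only [portA_inner]
    have hupd := upd_eq kind p lp rp hl hr
    simp only [] at hupd
    obtain ⟨e1, e2, j1, j2, e3, e4⟩ := hupd
    cases t with
    | nil =>
      have hlt : ¬ (s < n - 1) := by simp at hn; omega
      rw [if_neg hlt, PySem.List.enumerate_nil]
      simp only [portA_inner]
      rw [H _ _ out e3 e4, e1, e2]
      simp only [List.map_cons, List.map_nil, innerA]
    | cons q tt =>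
      have hlt : s < n - 1 := by simp at hn; omega
      rw [if_pos hlt]
      rw [iht (s + 1) [] [] _ (by simp at hn ⊢; omega) (by simp) (by simp) (by simp)]
      simp only [List.map_cons, innerA, strf, List.map_cons]
      rw [j1, j2]
      simp [jc]

theorem red_go (ops : List (String × String)) :
    ∀ lp rp out, (∀ x ∈ lp, x ≠ "") → (∀ x ∈ rp, x ≠ "") →
      portA_go ops lp rp out = out ++ strf (goA (charify ops) (jc lp) (jc rp)) := by
  induction ops with
  | nil =>
    intro lp rp out hl hr
    simp only [portA_go, charify, List.map_nil, goA]
    by_cases h : lp = [] ∧ rp = []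
    · obtain ⟨h1, h2⟩ := h
      subst h1; subst h2
      simp [strf, jc]
    · have hcond : lp ≠ [] ∨ rp ≠ [] := by tauto
      rw [if_pos hcond]
      have hjc : ¬ (jc lp = [] ∧ jc rp = []) := by
        rw [jc_eq_nil_of_no_empty lp hl, jc_eq_nil_of_no_empty rp hr]; exact h
      rw [if_neg hjc]
      simp [strf, join_empty_eq]
  | cons op t ih =>
    obtain ⟨kind, text⟩ := op
    intro lp rp out hl hr
    simp only [portA_go]
    have hparts : pvSplitNL text ≠ [] := by
      rw [pvSplitNL_eq]
      simp [splitNL_ne_nil]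
    have hlen : (0 : Int) + (pvSplitNL text).length = PySem.List.len (pvSplitNL text) := by
      simp [PySem.List.len]
    rw [red_inner kind _ t ih (pvSplitNL text) 0 lp rp out hlen hparts hl hr]
    have hmap : (pvSplitNL text).map String.toList = splitNL text.toList := by
      rw [pvSplitNL_eq]
      simp [List.map_map, Function.comp_def]
    rw [hmap]
    simp only [charify, List.map_cons, goA]

-- ---- port B reduction ----

def fL (op : String × String) : String :=
  let parts := pvSplitNL op.2
  if op.1 = "=" then op.2
  else if op.1 = "-" then PySem.Str.join "\n" (parts.map (pvWrap "\x1b[41m"))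
  else pvNLRepeat (parts.length - 1)

def fR (op : String × String) : String :=
  let parts := pvSplitNL op.2
  if op.1 = "=" then op.2
  else if op.1 = "+" then PySem.Str.join "\n" (parts.map (pvWrap "\x1b[42m"))
  else pvNLRepeat (parts.length - 1)

theorem portB_cols_eq (ops : List (String × String)) : ∀ acc,
    portB_cols ops acc = (acc.1 ++ ops.map fL, acc.2 ++ ops.map fR) := by
  induction ops with
  | nil => intro acc; simp [portB_cols]
  | cons op t ih =>
    intro acc
    simp only [portB_cols, List.foldl_cons] at ih ⊢
    rw [ih]
    by_cases hA : op.1 = "="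
    · simp [fL, fR, hA]
    · by_cases hB : op.1 = "-"
      · simp [fL, fR, hB]
      · by_cases hC : op.1 = "+"
        · simp [fL, fR, hC]
        · simp [fL, fR, hA, hB, hC]

def lcolBy (g : List Char → List Char → List Char) (k t : List Char) : List Char :=
  joinNL ((splitNL t).map (g k))

theorem joinNL_modifyHead (X : List (List Char)) (a : List Char) (h : X ≠ []) :
    joinNL (X.modifyHead (a ++ ·)) = a ++ joinNL X := by
  match X with
  | [x] => simp [joinNL]
  | x :: y :: t => simp [joinNL, List.append_assoc]

theorem joinNL_splitNL (l : List Char) : joinNL (splitNL l) = l := by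
  induction l with
  | nil => simp [joinNL]
  | cons c r ih =>
    by_cases hc : c = '\n'
    · subst hc
      rw [splitNL_cons_nl]
      cases h : splitNL r with
      | nil => exact absurd h (splitNL_ne_nil r)
      | cons x t =>
        rw [show joinNL ([] :: x :: t) = [] ++ '\n' :: joinNL (x :: t) from rfl]
        rw [← h, ih]
        simp
    · rw [splitNL_cons c r hc]
      rw [modifyHead_congr (c :: ·) ([c] ++ ·) _ (by intro x; simp)]
      rw [joinNL_modifyHead _ _ (splitNL_ne_nil r), ih]
      simp

theorem joinNL_replicate_nil (m : Nat) :
    joinNL (List.replicate (m + 1) []) = List.replicate m '\n' := by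
  induction m with
  | zero => simp [joinNL]
  | succ k ih =>
    rw [show List.replicate (k + 1 + 1) ([] : List Char) = [] :: [] :: List.replicate k [] from by
      simp [List.replicate_succ]]
    simp only [joinNL]
    rw [show ([] : List Char) :: List.replicate k ([] : List Char) = List.replicate (k + 1) [] from by
      simp [List.replicate_succ]]
    rw [ih]
    simp [List.replicate_succ]

theorem pvWrap_toList (color p : String) :
    (pvWrap color p).toList
      = (if p.toList = [] then [] else color.toList ++ p.toList ++ ("\x1b[0m" : String).toList) := by
  by_cases hp : p = ""
  · simp [pvWrap, hp, String.toList_empty]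
  · have : p.toList ≠ [] := fun hh => hp ((toList_eq_nil_iff p).mp hh)
    simp [pvWrap, hp, this, PySem.Chars.join, intercalate_nil_eq_flatten]

theorem pvNLRepeat_toList (m : Nat) : (pvNLRepeat m).toList = List.replicate m '\n' := by
  simp [pvNLRepeat]

theorem lpart_noNL (k p : List Char) (h : '\n' ∉ p) : '\n' ∉ lpart k p := by
  unfold lpart
  split_ifs <;> simp_all [redC, resetC]

theorem rpart_noNL (k p : List Char) (h : '\n' ∉ p) : '\n' ∉ rpart k p := by
  unfold rpart
  split_ifs <;> simp_all [greenC, resetC]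

theorem fL_toList (op : String × String) :
    (fL op).toList = lcolBy lpart op.1.toList op.2.toList := by
  have hEq : ("=" : String).toList = ['='] := by decide
  have hMinus : ("-" : String).toList = ['-'] := by decide
  have hNL : ("\n" : String).toList = ['\n'] := by decide
  unfold fL lcolBy
  by_cases h1 : op.1 = "="
  · rw [if_pos h1, h1, hEq]
    rw [show (splitNL op.2.toList).map (lpart ['=']) = (splitNL op.2.toList).map (fun p => p) from by
      apply List.map_congr_left; intro x _; simp [lpart]]
    simp [joinNL_splitNL]
  · rw [if_neg h1]
    have h1' : op.1.toList ≠ ['='] := by rw [← hEq]; exact toList_ne _ _ h1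
    by_cases h2 : op.1 = "-"
    · rw [if_pos h2]
      have h2t : op.1.toList = ['-'] := by rw [← hMinus, String.toList_inj]; exact h2
      rw [PySem.Str.toList_join, hNL, joinNL_eq_intercalate]
      unfold PySem.Chars.join
      congr 1
      rw [pvSplitNL_eq, List.map_map, List.map_map]
      apply List.map_congr_left
      intro x _
      have hred : ("\x1b[41m" : String).toList = redC := by decide
      have hres : ("\x1b[0m" : String).toList = resetC := by decide
      simp [Function.comp, pvWrap_toList, lpart, h2t, hred, hres]
    · rw [if_neg h2]
      have h2' : op.1.toList ≠ ['-'] := by rw [← hMinus]; exact toList_ne _ _ h2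
      rw [pvNLRepeat_toList]
      rw [show (splitNL op.2.toList).map (lpart op.1.toList)
            = List.replicate (splitNL op.2.toList).length [] from by
        rw [show (splitNL op.2.toList).map (lpart op.1.toList)
              = (splitNL op.2.toList).map (fun _ => ([] : List Char)) from by
          apply List.map_congr_left; intro x _; simp [lpart, h1', h2']]
        simp [List.map_const']]
      obtain ⟨m, hm⟩ : ∃ m, (splitNL op.2.toList).length = m + 1 := by
        cases h : splitNL op.2.toList with
        | nil => exact absurd h (splitNL_ne_nil _)
        | cons a t => exact ⟨t.length, by simp⟩
      have hlen : (pvSplitNL op.2).length = m + 1 := by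
        rw [pvSplitNL_eq, List.length_map, hm]
      rw [hm, joinNL_replicate_nil, hlen]
      simp

theorem fR_toList (op : String × String) :
    (fR op).toList = lcolBy rpart op.1.toList op.2.toList := by
  have hEq : ("=" : String).toList = ['='] := by decide
  have hPlus : ("+" : String).toList = ['+'] := by decide
  have hNL : ("\n" : String).toList = ['\n'] := by decide
  unfold fR lcolBy
  by_cases h1 : op.1 = "="
  · rw [if_pos h1, h1, hEq]
    rw [show (splitNL op.2.toList).map (rpart ['=']) = (splitNL op.2.toList).map (fun p => p) from by
      apply List.map_congr_left; intro x _; simp [rpart]]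
    simp [joinNL_splitNL]
  · rw [if_neg h1]
    have h1' : op.1.toList ≠ ['='] := by rw [← hEq]; exact toList_ne _ _ h1
    by_cases h2 : op.1 = "+"
    · rw [if_pos h2]
      have h2t : op.1.toList = ['+'] := by rw [← hPlus, String.toList_inj]; exact h2
      rw [PySem.Str.toList_join, hNL, joinNL_eq_intercalate]
      unfold PySem.Chars.join
      congr 1
      rw [pvSplitNL_eq, List.map_map, List.map_map]
      apply List.map_congr_left
      intro x _
      have hgr : ("\x1b[42m" : String).toList = greenC := by decide
      have hres : ("\x1b[0m" : String).toList = resetC := by decide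
      simp [Function.comp, pvWrap_toList, rpart, h2t, hgr, hres]
    · rw [if_neg h2]
      have h2' : op.1.toList ≠ ['+'] := by rw [← hPlus]; exact toList_ne _ _ h2
      rw [pvNLRepeat_toList]
      rw [show (splitNL op.2.toList).map (rpart op.1.toList)
            = List.replicate (splitNL op.2.toList).length [] from by
        rw [show (splitNL op.2.toList).map (rpart op.1.toList)
              = (splitNL op.2.toList).map (fun _ => ([] : List Char)) from by
          apply List.map_congr_left; intro x _; simp [rpart, h1', h2']]
        simp [List.map_const']]
      obtain ⟨m, hm⟩ : ∃ m, (splitNL op.2.toList).length = m + 1 := by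
        cases h : splitNL op.2.toList with
        | nil => exact absurd h (splitNL_ne_nil _)
        | cons a t => exact ⟨t.length, by simp⟩
      have hlen : (pvSplitNL op.2).length = m + 1 := by
        rw [pvSplitNL_eq, List.length_map, hm]
      rw [hm, joinNL_replicate_nil, hlen]
      simp

theorem splitNL_lcol_flatten (g : List Char → List Char → List Char)
    (hg : ∀ k p, '\n' ∉ p → '\n' ∉ g k p)
    (ops : List (List Char × List Char)) :
    splitNL ((ops.map (fun p => lcolBy g p.1 p.2)).flatten) = linesBy g ops := by
  induction ops with
  | nil => simp [linesBy]
  | cons op t ih =>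
    obtain ⟨k, tx⟩ := op
    simp only [List.map_cons, List.flatten_cons, linesBy]
    rw [splitNL_append, ih]
    congr 1
    unfold lcolBy
    rw [splitNL_joinNL]
    · intro p hp
      obtain ⟨q, hq, rfl⟩ := List.mem_map.mp hp
      exact hg k q (noNL_mem_splitNL tx q hq)
    · simp [splitNL_ne_nil]

theorem map_dropLast {α β : Type} (f : α → β) (l : List α) :
    (l.map f).dropLast = l.dropLast.map f := by
  induction l with
  | nil => simp
  | cons a t ih => cases t <;> simp_all

theorem alt_eq (opcodes : List (String × String)) :
    generate_side_by_side_lines_alt opcodes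
      = strf (emitC ((linesBy lpart (charify opcodes)).zip (linesBy rpart (charify opcodes)))) := by
  unfold generate_side_by_side_lines_alt
  rw [portB_cols_eq]
  simp only [List.nil_append]
  rw [join_empty_eq, join_empty_eq]
  have hL : jc (opcodes.map fL) = ((charify opcodes).map (fun p => lcolBy lpart p.1 p.2)).flatten := by
    simp only [jc, charify, List.map_map]
    congr 1
    apply List.map_congr_left
    intro op _
    simp [fL_toList]
  have hR : jc (opcodes.map fR) = ((charify opcodes).map (fun p => lcolBy rpart p.1 p.2)).flatten := by
    simp only [jc, charify, List.map_map]
    congr 1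
    apply List.map_congr_left
    intro op _
    simp [fR_toList]
  rw [hL, hR, pvSplitNL_eq, pvSplitNL_eq]
  simp only [String.toList_ofList]
  rw [splitNL_lcol_flatten lpart lpart_noNL, splitNL_lcol_flatten rpart rpart_noNL]
  rw [List.zip_map]
  set P := (linesBy lpart (charify opcodes)).zip (linesBy rpart (charify opcodes)) with hP
  have hstrf : ∀ (l : List (List Char × List Char)),
      strf l = l.map (Prod.map String.ofList String.ofList) := by
    intro l
    unfold strf
    apply List.map_congr_left
    intro x _
    cases x
    simp [Prod.map]
  have hofnil : ∀ (a : List Char), String.ofList a = "" ↔ a = [] := by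
    intro a
    constructor
    · intro h
      have := congrArg String.toList h
      simpa [String.toList_empty] using this
    · intro h; simp [h]
  have hg2 : ((P.map (Prod.map String.ofList String.ofList)).getLast? = some ("", ""))
      ↔ (P.getLast? = some (([] : List Char), ([] : List Char))) := by
    rw [List.getLast?_map]
    cases h : P.getLast? with
    | none => simp
    | some x =>
      cases x with
      | mk a b => simp [Prod.map, Prod.ext_iff, hofnil]
  unfold emitC
  by_cases hc : P.getLast? = some (([] : List Char), ([] : List Char))
  · rw [if_pos (hg2.mpr hc), if_pos hc, hstrf]
    rw [map_dropLast]
  · rw [if_neg (fun hh => hc (hg2.mp hh)), if_neg hc, hstrf]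

-- ===== VERDICT (by name: the statement is the Claim_ definition above) =====
theorem generate_side_by_side_lines_spec : Claim_equal_generate_side_by_side_lines := by
  intro opcodes _
  unfold Spec_generate_side_by_side_lines
  have hA := red_go opcodes [] [] [] (by simp) (by simp)
  have hgo := goA_eq (charify opcodes) [] []
  simp only [jc, List.map_nil, List.flatten_nil] at hA
  rw [generate_side_by_side_lines, hA, hgo, alt_eq]
  simp
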